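-- pv_equiv track=rewrite | github.com/ZeroMin-K/Algorithm-Study | 프로그래머스/Level 2/스킬트리-solve.py | solution
-- ===== SOURCE A (Python) =====
-- def solution(skill, skill_trees):
--     answer = -1
--     # skill_len skill의 길이로 초기화
--     skill_len = len(skill)
--
--     # 가능한 스킬 트리 개수 possibe_skill_tree_num 0으로 초기화
--     possible_skill_tree_num = 0
--     # skill_trees를 하나씩 탐색하면서 : 원소 skill_tree
--     for skill_tree in skill_trees:
--         # 선행 스킬의 인덱스 skill_idx 0으로 초기화
--         skill_idx = 0
--         # 현재 스킬트리가 가능한지 여부 is_possible_skill_tree True로 초기화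
--         is_possible_skill_tree = True
--         # skill_tree를 하나씩 탐색하면서 : 원소 skill_to_learn
--         for skill_to_learn in skill_tree:
--             # skill_to_learn이 skill에 있으면
--             if skill_to_learn in skill:
--                 # skill_idx가 skill_len보다 작고 skill[skill_idx]와 skill_to_learn이 다르면
--                 if skill_idx < skill_len and skill[skill_idx] != skill_to_learn:
--                     # is_possible_skill_tree False로 변경 (현재 스킬트리 불가)
--                     is_possible_skill_tree = False
--                     # break
--                     break
--                 # 같으면
--                 else:
--                     # skill_idx 1 증가
--                     skill_idx += 1
--
--         # is_possible_skill_tree 가 True이면 (현재 스킬트리가 가능하다면)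
--         if is_possible_skill_tree:
--             # possible_skill_tree_num 1증가
--             possible_skill_tree_num += 1
--
--     # possible_skill_tree_num 리턴
--     return possible_skill_tree_num
-- ===== SOURCE B (Python) =====
-- def solution(skill, skill_trees):
--     # Different traversal: drive the check by SKILL, consuming a single iterator
--     # over the tree; once all of skill is matched the rest of the tree is ignored.
--     count = 0
--     for tree in skill_trees:
--         it = iter(tree)
--         valid = True
--         for want in skill:
--             nxt = next((c for c in it if c in skill), None)
--             if nxt is None:
--                 break          # tree exhausted: remaining skills just not learned
--             if nxt != want:
--                 valid = False  # learned a prerequisite-governed skill out of order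
--                 break
--         count += valid
--     return count
-- ===== Notes on version B (the rewrite author's own statement) =====
-- stated objective: alternative
-- what changed: B inverts the loop structure: instead of A's single pass over the tree tracking a skill index, B iterates over skill and for each wanted skill consumes a shared iterator of the tree to find the next skill-character, stopping once skill is exhausted.
import Mathlib
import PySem

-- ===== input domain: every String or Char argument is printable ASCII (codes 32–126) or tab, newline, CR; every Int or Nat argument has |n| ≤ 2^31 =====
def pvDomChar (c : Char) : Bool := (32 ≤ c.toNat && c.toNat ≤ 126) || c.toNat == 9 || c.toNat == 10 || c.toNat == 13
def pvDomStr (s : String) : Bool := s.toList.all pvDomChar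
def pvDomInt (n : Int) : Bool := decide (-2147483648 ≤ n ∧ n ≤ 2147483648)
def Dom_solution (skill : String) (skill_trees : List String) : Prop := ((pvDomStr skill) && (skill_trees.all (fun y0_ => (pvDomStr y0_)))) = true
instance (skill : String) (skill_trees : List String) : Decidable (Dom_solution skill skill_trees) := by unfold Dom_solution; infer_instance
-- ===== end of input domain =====

-- B inverts the loop structure: it iterates over SKILL, consuming one shared
-- iterator of the tree to fetch each next skill-character, instead of A's single
-- pass over the tree tracking a skill index; objective: alternative.


-- ===== PORT A =====
-- inner 'for skill_to_learn in skill_tree' loop, state = (skill_idx, break/continue);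
-- returns is_possible_skill_tree.  'skill_to_learn in skill' is PySem.Chars.isIn (substring
-- test of a 1-char string); 'skill[skill_idx]' is PySem.List.pyGet? (only read when
-- skill_idx < skill_len, so the some-comparison is exact).
def loopA (s : List Char) : List Char → Int → Bool
  | [], _ => true
  | c :: rest, skill_idx =>
    if PySem.Chars.isIn [c] s then
      if skill_idx < (s.length : Int) && !(PySem.List.pyGet? s skill_idx == some c) then
        false
      else
        loopA s rest (skill_idx + 1)
    else
      loopA s rest skill_idx

def solution (skill : String) (skill_trees : List String) : Int :=
  -- answer = -1 in the Python is dead (never read); skill_len = len(skill)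
  skill_trees.foldl
    (fun possible_skill_tree_num skill_tree =>
      if loopA skill.toList skill_tree.toList 0 then possible_skill_tree_num + 1
      else possible_skill_tree_num)
    0

-- ===== PORT B =====
-- next((c for c in it if c in skill), None): first skill-character of the
-- remaining tree, together with the iterator's remaining suffix
def scanNext (s : List Char) : List Char → Option (Char × List Char)
  | [] => none
  | c :: rest => if PySem.Chars.isIn [c] s then some (c, rest) else scanNext s rest

-- 'for want in skill' loop of B, state = the iterator's remainder of the tree
def loopB (s : List Char) : List Char → List Char → Bool
  | [], _ => true
  | want :: ws, tree =>
    match scanNext s tree with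
    | none => true
    | some (c, rest) => if c == want then loopB s ws rest else false

def solution_alt (skill : String) (skill_trees : List String) : Int :=
  skill_trees.foldl
    (fun count tree =>
      if loopB skill.toList skill.toList tree.toList then count + 1 else count)
    0

-- ===== PRECONDITION & SPEC =====
def Spec_solution (skill : String) (skill_trees : List String) (out : Int) : Prop := out = solution_alt skill skill_trees
instance (skill : String) (skill_trees : List String) (out : Int) : Decidable (Spec_solution skill skill_trees out) := by unfold Spec_solution; infer_instance

-- ===== CLAIM (what is proved, stated in full; the proofs are below) =====
def Claim_equal_solution : Prop := ∀ (skill : String) (skill_trees : List String), Dom_solution skill skill_trees → Spec_solution skill skill_trees (solution skill skill_trees)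

-- ===== LEMMAS AND PROOFS =====

-- once skill_idx has reached len(skill), A's inner loop can never fail
lemma loopA_of_ge (s : List Char) : ∀ (t : List Char) (idx : Int),
    (s.length : Int) ≤ idx → loopA s t idx = true := by
  intro t
  induction t with
  | nil => intro idx _; rfl
  | cons c rest ih =>
    intro idx h
    simp only [loopA]
    split
    · have : ¬ (idx < (s.length : Int)) := by omega
      simp [this]
      exact ih (idx + 1) (by omega)
    · exact ih idx h

-- A's inner loop from index idx decides the two-sided prefix comparison of the
-- filtered remainder against s.drop idx
lemma loopA_eq (s : List Char) : ∀ (t : List Char) (idx : Nat),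
    loopA s t (idx : Int)
      = (let f := t.filter (fun c => PySem.Chars.isIn [c] s)
         f.take (s.length - idx) == (s.drop idx).take f.length) := by
  intro t
  induction t with
  | nil => intro idx; simp [loopA]
  | cons c rest ih =>
    intro idx
    simp only [loopA]
    by_cases hc : PySem.Chars.isIn [c] s
    · simp only [hc, if_true]
      by_cases hlt : idx < s.length
      · have hidx : ((idx : Int) < (s.length : Int)) := by exact_mod_cast hlt
        have hsome : s[idx]? = some s[idx] := List.getElem?_eq_getElem hlt
        have hdrop : s.drop idx = s[idx] :: s.drop (idx + 1) :=
          (List.getElem_cons_drop hlt).symm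
        by_cases heq : s[idx] = c
        · have hcond : ¬ ((idx : Int) < (s.length : Int)
              && !(PySem.List.pyGet? s (idx : Int) == some c)) = true := by
            simp [hsome, heq]
          simp only [hcond, if_neg, Bool.not_eq_true]
          have hrec : ((idx : Int) + 1) = ((idx + 1 : Nat) : Int) := by push_cast; ring
          rw [hrec, ih (idx + 1)]
          have hsub : s.length - idx = (s.length - (idx + 1)) + 1 := by omega
          rw [hsub, hdrop]
          simp [hc, List.take_succ_cons, heq]
        · have hcond : ((idx : Int) < (s.length : Int)
              && !(PySem.List.pyGet? s (idx : Int) == some c)) = true := by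
            simp [hsome, hidx]
            exact heq
          simp only [hcond, if_pos]
          obtain ⟨m, hm⟩ : ∃ m, s.length - idx = m + 1 := ⟨s.length - idx - 1, by omega⟩
          rw [hm, hdrop]
          simp only [List.filter_cons, hc, if_true, List.take_succ_cons, List.length_cons]
          simp
          exact fun h => absurd h.symm heq
      · have h1 : ¬ ((idx : Int) < (s.length : Int)) := by
          intro h; exact hlt (by exact_mod_cast h)
        simp only [h1, decide_false, Bool.false_and, Bool.false_eq_true, if_false]
        rw [loopA_of_ge s rest ((idx : Int) + 1) (by omega)]
        have h2 : s.length - idx = 0 := by omega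
        have h3 : s.drop idx = [] := List.drop_eq_nil_of_le (by omega)
        simp [h2, h3]
    · have hcf : PySem.Chars.isIn [c] s = false := by simpa using hc
      simp only [hcf, Bool.false_eq_true, if_false, List.filter_cons]
      simpa using ih idx

-- scanNext returns the head of the filtered remainder (and the iterator suffix)
lemma scanNext_none (s : List Char) : ∀ (t : List Char),
    scanNext s t = none → t.filter (fun c => PySem.Chars.isIn [c] s) = [] := by
  intro t
  induction t with
  | nil => intro _; rfl
  | cons c rest ih =>
    intro h
    simp only [scanNext] at h
    by_cases hc : PySem.Chars.isIn [c] s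
    · simp [hc] at h
    · simp only [List.filter_cons, hc, Bool.false_eq_true, if_false]
      exact ih (by simpa [hc] using h)

lemma scanNext_some (s : List Char) : ∀ (t c : List Char ) (ch : Char),
    scanNext s t = some (ch, c) →
      t.filter (fun x => PySem.Chars.isIn [x] s)
        = ch :: c.filter (fun x => PySem.Chars.isIn [x] s) := by
  intro t
  induction t with
  | nil => intro c ch h; simp [scanNext] at h
  | cons d rest ih =>
    intro c ch h
    simp only [scanNext] at h
    by_cases hd : PySem.Chars.isIn [d] s
    · simp only [hd, if_true, Option.some.injEq, Prod.mk.injEq] at h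
      obtain ⟨h1, h2⟩ := h
      subst h1; subst h2
      simp [List.filter_cons, hd]
    · simp only [List.filter_cons, hd, Bool.false_eq_true, if_false]
      exact ih c ch (by simpa [hd] using h)

-- B's skill-driven loop decides the same two-sided prefix comparison
lemma loopB_eq (s : List Char) : ∀ (ws t : List Char),
    loopB s ws t
      = (let f := t.filter (fun c => PySem.Chars.isIn [c] s)
         f.take ws.length == ws.take f.length) := by
  intro ws
  induction ws with
  | nil => intro t; simp [loopB]
  | cons w ws' ih =>
    intro t
    simp only [loopB]
    cases hscan : scanNext s t with
    | none =>
      have hf := scanNext_none s t hscan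
      simp [hf]
    | some p =>
      obtain ⟨c, rest⟩ := p
      have hf := scanNext_some s t rest c hscan
      by_cases hcw : c = w
      · simp only [hcw, beq_self_eq_true, if_true, ih rest]
        simp [hf, hcw, List.take_succ_cons]
      · have : (c == w) = false := by simpa using hcw
        simp [this, hf, List.take_succ_cons, hcw]

-- per-tree agreement: A's inner loop started at 0 equals B's skill-driven loop
lemma valid_eq (s t : List Char) : loopA s t 0 = loopB s s t := by
  have h0 : (0 : Int) = ((0 : Nat) : Int) := rfl
  rw [h0, loopA_eq s t 0, loopB_eq s s t]
  simp

-- ===== VERDICT (by name: the statement is the Claim_ definition above) =====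
theorem solution_spec : Claim_equal_solution := by
  intro skill skill_trees _
  unfold Spec_solution solution solution_alt
  have : (fun (n : Int) (tree : String) =>
      if loopA skill.toList tree.toList 0 then n + 1 else n)
      = (fun (n : Int) (tree : String) =>
      if loopB skill.toList skill.toList tree.toList then n + 1 else n) := by
    funext n tree
    rw [valid_eq]
  rw [this]
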